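-- pv_equiv track=rewrite | github.com/boat-sirapob/advent-of-code-2023 | 13/part1.py | check_row_mirror
-- ===== SOURCE A (Python) =====
-- def check_row_mirror(pattern, row_num):
--     mirrored = False
--     offset = 1
--     # expand from row_num
--     while row_num-offset >= 0 and row_num+offset-1 < len(pattern):
--         mirrored = False
--
--         if pattern[row_num-offset] == pattern[row_num+offset-1]:
--             mirrored = True
--
--         if not mirrored:
--             break
--
--         offset += 1
--
--     return mirrored
-- ===== SOURCE B (Python) =====
-- def check_row_mirror(pattern, row_num):
--     if row_num <= 0 or row_num >= len(pattern):
--         return False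
--     above = list(reversed(pattern[:row_num]))
--     below = pattern[row_num:]
--     return all(a == b for a, b in zip(above, below))
-- ===== Notes on version B (the rewrite author's own statement) =====
-- stated objective: idiomatic
-- what changed: Replaces the offset-expanding while loop with break/flag by a declarative formulation: slice the rows above the split (reversed) and below, zip them into mirrored pairs and test all(a == b), with an explicit boundary guard replacing the never-entered-loop False.
import Mathlib
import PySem

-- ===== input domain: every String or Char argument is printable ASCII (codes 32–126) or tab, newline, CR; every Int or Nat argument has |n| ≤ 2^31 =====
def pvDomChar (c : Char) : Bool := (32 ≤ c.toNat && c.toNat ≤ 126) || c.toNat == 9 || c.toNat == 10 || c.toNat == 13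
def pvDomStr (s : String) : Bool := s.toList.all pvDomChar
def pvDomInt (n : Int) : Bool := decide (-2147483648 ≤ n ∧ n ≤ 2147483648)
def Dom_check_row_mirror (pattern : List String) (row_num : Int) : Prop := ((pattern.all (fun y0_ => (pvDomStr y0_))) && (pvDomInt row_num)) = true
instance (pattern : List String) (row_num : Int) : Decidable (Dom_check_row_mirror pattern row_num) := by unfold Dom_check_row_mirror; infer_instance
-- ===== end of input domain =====

-- B replaces A's offset-expanding while loop (flag + break) by zipping the reversed
-- rows above the split with the rows below and testing that all pairs are equal
-- (objective: idiomatic); same return value on every input, no speed claim.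

-- ===== PORT A =====
-- A's while loop: one fuel unit per condition check; fuel = pattern.length always
-- suffices (the loop runs at most min(row_num, len-row_num) < len times).
def checkRowLoopA (pattern : List String) (row_num : Int) :
    Nat → Bool → Int → Bool
  | 0, mirrored, _ => mirrored
  | fuel + 1, mirrored, offset =>
    if 0 ≤ row_num - offset ∧ row_num + offset - 1 < (pattern.length : Int) then
      -- mirrored = False; if pattern[i] == pattern[j]: mirrored = True
      let mirrored' :=
        decide (PySem.List.pyGet? pattern (row_num - offset)
                = PySem.List.pyGet? pattern (row_num + offset - 1))
      if !mirrored' then mirrored'                       -- break, then return mirrored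
      else checkRowLoopA pattern row_num fuel mirrored' (offset + 1)
    else mirrored

def check_row_mirror (pattern : List String) (row_num : Int) : Bool :=
  checkRowLoopA pattern row_num pattern.length false 1

-- ===== PORT B =====
def check_row_mirror_alt (pattern : List String) (row_num : Int) : Bool :=
  if row_num ≤ 0 ∨ (pattern.length : Int) ≤ row_num then false
  else
    let above := (PySem.List.slice pattern none (some row_num)).reverse
    let below := PySem.List.slice pattern (some row_num) none
    (above.zip below).all (fun p => p.1 == p.2)

-- ===== PRECONDITION & SPEC =====
def Spec_check_row_mirror (pattern : List String) (row_num : Int) (out : Bool) : Prop := out = check_row_mirror_alt pattern row_num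
instance (pattern : List String) (row_num : Int) (out : Bool) : Decidable (Spec_check_row_mirror pattern row_num out) := by unfold Spec_check_row_mirror; infer_instance

-- ===== CLAIM (what is proved, stated in full; the proofs are below) =====
def Claim_equal_check_row_mirror : Prop := ∀ (pattern : List String) (row_num : Int), Dom_check_row_mirror pattern row_num → Spec_check_row_mirror pattern row_num (check_row_mirror pattern row_num)

-- ===== LEMMAS AND PROOFS =====

-- the k-th mirrored comparison, as A performs it (k = offset, a Nat)
def pvEqk (pattern : List String) (r k : Nat) : Bool :=
  decide (PySem.List.pyGet? pattern ((r : Int) - (k : Int))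
          = PySem.List.pyGet? pattern ((r : Int) + (k : Int) - 1))

-- characterisation of A's loop for 0 < r < len, from any offset o ≥ 1
theorem checkRowLoopA_eq (pattern : List String) (r : Nat)
    (h2 : r < pattern.length) :
    ∀ (fuel o : Nat) (m_in : Bool), 1 ≤ o →
      min r (pattern.length - r) + 1 ≤ o + fuel →
      checkRowLoopA pattern (r : Int) fuel m_in (o : Int) =
        if o ≤ min r (pattern.length - r) then
          (List.range' o (min r (pattern.length - r) + 1 - o)).all (pvEqk pattern r)
        else m_in := by
  intro fuel
  induction fuel with
  | zero =>
    intro o m_in ho hf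
    have : ¬ o ≤ min r (pattern.length - r) := by omega
    simp [checkRowLoopA, this]
  | succ f ih =>
    intro o m_in ho hf
    set m := min r (pattern.length - r) with hm
    by_cases hcond : o ≤ m
    · have hc : 0 ≤ (r : Int) - (o : Int) ∧ (r : Int) + (o : Int) - 1 < (pattern.length : Int) := by
        constructor <;> [omega; (push_cast; omega)]
      rw [checkRowLoopA, if_pos hc]
      have hrange : m + 1 - o = (m - o) + 1 := by omega
      rw [if_pos hcond, hrange, List.range'_succ, List.all_cons]
      by_cases heq : pvEqk pattern r o = true
      · have hlet : decide (PySem.List.pyGet? pattern ((r : Int) - (o : Int))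
              = PySem.List.pyGet? pattern ((r : Int) + (o : Int) - 1)) = true := heq
        simp only [hlet, Bool.not_true, Bool.false_eq_true, if_false]
        have hcast : ((o : Int) + 1) = ((o + 1 : Nat) : Int) := by omega
        rw [hcast, ih (o + 1) true (by omega) (by omega), heq, Bool.true_and]
        by_cases h3 : o + 1 ≤ m
        · rw [if_pos h3]
          have : m + 1 - (o + 1) = m - o := by omega
          rw [this]
        · rw [if_neg h3]
          have : m - o = 0 := by omega
          simp [this]
      · have heq' : pvEqk pattern r o = false := by
          cases h : pvEqk pattern r o <;> simp_all
        have hlet : decide (PySem.List.pyGet? pattern ((r : Int) - (o : Int))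
              = PySem.List.pyGet? pattern ((r : Int) + (o : Int) - 1)) = false := heq'
        simp [hlet, heq']
    · have hc : ¬ (0 ≤ (r : Int) - (o : Int) ∧ (r : Int) + (o : Int) - 1 < (pattern.length : Int)) := by
        push_cast; omega
      rw [checkRowLoopA, if_neg hc, if_neg hcond]

-- B's zipped pair list is exactly the range'-indexed list of A's comparisons
theorem zip_all_eq_range_all (pattern : List String) (r : Nat)
    (h1 : 0 < r) (h2 : r < pattern.length) :
    (((pattern.take r).reverse.zip (pattern.drop r)).all (fun p => p.1 == p.2)) =
      (List.range' 1 (min r (pattern.length - r))).all (pvEqk pattern r) := by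
  set m := min r (pattern.length - r) with hm
  have hlen : ((pattern.take r).reverse.zip (pattern.drop r)).length = m := by
    simp [List.length_zip, hm]
  rw [Bool.eq_iff_iff, List.all_eq_true, List.all_eq_true]
  constructor
  · intro h k hk
    rw [List.mem_range'_1] at hk
    obtain ⟨hk1, hk2⟩ := hk
    have hi : k - 1 < ((pattern.take r).reverse.zip (pattern.drop r)).length := by omega
    have := h _ (List.getElem_mem hi)
    rw [List.getElem_zip] at this
    have ha : (pattern.take r).reverse[k-1]'(by simp; omega) =
        pattern[r - k]'(by omega) := by
      rw [List.getElem_reverse, List.getElem_take]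
      congr 1; simp; omega
    have hb : (pattern.drop r)[k-1]'(by simp; omega) =
        pattern[r + k - 1]'(by omega) := by
      rw [List.getElem_drop]; congr 1; omega
    rw [ha, hb] at this
    unfold pvEqk
    have e1 : (r : Int) - (k : Int) = ((r - k : Nat) : Int) := by omega
    have e2 : (r : Int) + (k : Int) - 1 = ((r + k - 1 : Nat) : Int) := by omega
    rw [e1, e2, PySem.List.pyGet?_natCast, PySem.List.pyGet?_natCast,
        List.getElem?_eq_getElem (by omega), List.getElem?_eq_getElem (by omega)]
    simp only [decide_eq_true_eq, Option.some.injEq]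
    exact eq_of_beq this
  · intro h p hp
    rw [List.mem_iff_getElem] at hp
    obtain ⟨i, hi, hpi⟩ := hp
    have him : i < m := by omega
    have := h (i + 1) (by rw [List.mem_range'_1]; omega)
    unfold pvEqk at this
    have e1 : (r : Int) - ((i + 1 : Nat) : Int) = ((r - (i + 1) : Nat) : Int) := by omega
    have e2 : (r : Int) + ((i + 1 : Nat) : Int) - 1 = ((r + (i + 1) - 1 : Nat) : Int) := by omega
    rw [e1, e2, PySem.List.pyGet?_natCast, PySem.List.pyGet?_natCast,
        List.getElem?_eq_getElem (by omega), List.getElem?_eq_getElem (by omega)] at this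
    simp only [decide_eq_true_eq, Option.some.injEq] at this
    rw [← hpi, List.getElem_zip]
    have ha : (pattern.take r).reverse[i]'(by simp; omega) =
        pattern[r - (i + 1)]'(by omega) := by
      rw [List.getElem_reverse, List.getElem_take]
      congr 1; simp; omega
    have hb : (pattern.drop r)[i]'(by simp; omega) =
        pattern[r + (i + 1) - 1]'(by omega) := by
      rw [List.getElem_drop]; congr 1
    simp only [ha, hb]
    exact beq_of_eq this

-- ===== VERDICT (by name: the statement is the Claim_ definition above) =====
theorem check_row_mirror_spec : Claim_equal_check_row_mirror := by
  intro pattern row_num _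
  unfold Spec_check_row_mirror check_row_mirror check_row_mirror_alt
  by_cases hout : row_num ≤ 0 ∨ (pattern.length : Int) ≤ row_num
  · rw [if_pos hout]
    cases hlen : pattern.length with
    | zero => simp [checkRowLoopA]
    | succ n =>
      rw [checkRowLoopA, if_neg]
      rw [hlen]; omega
  · rw [if_neg hout]
    rw [not_or, not_le, not_le] at hout
    obtain ⟨h0, hlt⟩ := hout
    set r := row_num.toNat with hr
    have hrow : row_num = (r : Int) := by omega
    have h1 : 0 < r := by omega
    have h2 : r < pattern.length := by omega
    rw [hrow, PySem.List.slice_to_natCast, PySem.List.slice_from_natCast,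
        ← Nat.cast_one (R := Int),
        checkRowLoopA_eq pattern r h2 pattern.length 1 false (by omega) (by omega),
        if_pos (by omega), zip_all_eq_range_all pattern r h1 h2]
    simp only [Nat.add_sub_cancel]
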